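-- pv_equiv track=rewrite | github.com/Sambhav242005/Time-Table-Gen-AI | ui/pages/view_page.py | _format_multi_entry
-- ===== SOURCE A (Python) =====
-- def _format_multi_entry(entries, mode):
--     """Format multiple overlapping entries (e.g. P1 + P2) into one cell."""
--     all_parts = []
--     # Use the first entry's batch color as a split background
--     # We'll use a gradient-style approach: show both with a separator
--     for entry in entries:
--         parts = [entry.get('subject', '')]
--
--         if mode == "section":
--             if entry.get('teacher'):
--                 parts.append(f"({entry['teacher']})")
--             if entry.get('room'):
--                 parts.append(f"[{entry['room']}]")
--         elif mode == "teacher":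
--             if entry.get('section'):
--                 parts.append(f"({entry['section']})")
--             if entry.get('room'):
--                 parts.append(f"[{entry['room']}]")
--         elif mode == "room":
--             if entry.get('section'):
--                 parts.append(f"({entry['section']})")
--             if entry.get('teacher'):
--                 parts.append(f"[{entry['teacher']}]")
--
--         if entry.get('batch'):
--             parts.append(f"{{{entry['batch']}}}")
--
--         all_parts.append("\n".join(parts))
--
--     item_text = "\n━━━━━━━━━━━━\n".join(all_parts)
--
--     # For multi-entry, use a blended color (medium blue)
--     return item_text, "#42A5F5", "#000000"
-- ===== SOURCE B (Python) =====
-- # B: recursive back-to-front rendering that builds each cell by direct string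
-- # concatenation (no parts lists, no str.join); the two bracketed fields per
-- # mode come from one pair lookup (objective: alternative decomposition).
--
-- _MODE_FIELDS = {
--     "section": ("teacher", "room"),
--     "teacher": ("section", "room"),
--     "room": ("section", "teacher"),
-- }
--
--
-- def _format_multi_entry(entries, mode):
--     fields = _MODE_FIELDS.get(mode)
--
--     def cell(entry):
--         s = entry.get('subject', '')
--         if fields is not None:
--             paren, brack = fields
--             if entry.get(paren):
--                 s += "\n(" + entry[paren] + ")"
--             if entry.get(brack):
--                 s += "\n[" + entry[brack] + "]"
--         if entry.get('batch'):
--             s += "\n{" + entry['batch'] + "}"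
--         return s
--
--     def render(rest):
--         if not rest:
--             return ""
--         if len(rest) == 1:
--             return cell(rest[0])
--         return cell(rest[0]) + "\n━━━━━━━━━━━━\n" + render(rest[1:])
--
--     return render(entries), "#42A5F5", "#000000"
-- ===== Notes on version B (the rewrite author's own statement) =====
-- stated objective: alternative
-- what changed: Replaces A's list-of-parts plus two str.join passes and the per-mode if/elif ladder by a recursive back-to-front renderer that builds each cell and the whole text by direct string concatenation, with one mode->field-pair lookup.
import Mathlib
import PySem

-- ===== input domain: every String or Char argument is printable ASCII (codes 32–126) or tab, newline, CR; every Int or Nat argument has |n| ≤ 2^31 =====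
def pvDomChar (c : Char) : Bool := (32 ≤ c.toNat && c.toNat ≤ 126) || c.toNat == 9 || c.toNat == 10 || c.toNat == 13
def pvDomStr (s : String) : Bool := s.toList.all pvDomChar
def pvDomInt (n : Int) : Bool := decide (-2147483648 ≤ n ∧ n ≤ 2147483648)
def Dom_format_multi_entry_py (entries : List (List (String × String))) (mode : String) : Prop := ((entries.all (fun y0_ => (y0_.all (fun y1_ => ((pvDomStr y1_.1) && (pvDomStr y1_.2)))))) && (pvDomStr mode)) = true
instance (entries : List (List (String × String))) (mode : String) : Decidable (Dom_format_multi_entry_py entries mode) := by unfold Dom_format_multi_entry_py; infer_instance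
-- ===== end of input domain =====

-- B renders the cells recursively back-to-front by direct string concatenation
-- (no parts lists, no str.join), with one mode -> field-pair lookup (objective: alternative).

-- ===== PORT A =====
-- one cell of A's loop body: parts built by the if/elif chain, joined with "\n"
def pvCellA (mode : String) (e : List (String × String)) : String :=
  let parts := [(PySem.Dict.mk e).getD "subject" ""]
  let parts :=
    if mode == "section" then
      let parts := if (PySem.Dict.mk e).getD "teacher" "" ≠ "" then
        parts ++ ["(" ++ (PySem.Dict.mk e).getD "teacher" "" ++ ")"] else parts
      if (PySem.Dict.mk e).getD "room" "" ≠ "" then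
        parts ++ ["[" ++ (PySem.Dict.mk e).getD "room" "" ++ "]"] else parts
    else if mode == "teacher" then
      let parts := if (PySem.Dict.mk e).getD "section" "" ≠ "" then
        parts ++ ["(" ++ (PySem.Dict.mk e).getD "section" "" ++ ")"] else parts
      if (PySem.Dict.mk e).getD "room" "" ≠ "" then
        parts ++ ["[" ++ (PySem.Dict.mk e).getD "room" "" ++ "]"] else parts
    else if mode == "room" then
      let parts := if (PySem.Dict.mk e).getD "section" "" ≠ "" then
        parts ++ ["(" ++ (PySem.Dict.mk e).getD "section" "" ++ ")"] else parts
      if (PySem.Dict.mk e).getD "teacher" "" ≠ "" then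
        parts ++ ["[" ++ (PySem.Dict.mk e).getD "teacher" "" ++ "]"] else parts
    else parts
  let parts := if (PySem.Dict.mk e).getD "batch" "" ≠ "" then
    parts ++ ["{" ++ (PySem.Dict.mk e).getD "batch" "" ++ "}"] else parts
  PySem.Str.join "\n" parts

def format_multi_entry_py (entries : List (List (String × String))) (mode : String) : String × String × String :=
  let all_parts := entries.foldl (fun acc e => acc ++ [pvCellA mode e]) []
  (PySem.Str.join "\n━━━━━━━━━━━━\n" all_parts, "#42A5F5", "#000000")

-- ===== PORT B =====
-- the _MODE_FIELDS dict of Source B; fields = _MODE_FIELDS.get(mode)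
def pvModeFields : PySem.Dict String (String × String) :=
  PySem.Dict.mk
    [("section", ("teacher", "room")),
     ("teacher", ("section", "room")),
     ("room",    ("section", "teacher"))]

-- Source B's cell: direct string concatenation, no parts list
def pvCellB (fields : Option (String × String)) (e : List (String × String)) : String :=
  let d := PySem.Dict.mk e
  let s := d.getD "subject" ""
  let s := match fields with
    | some (paren, brack) =>
      let s := if d.getD paren "" ≠ "" then s ++ "\n(" ++ d.getD paren "" ++ ")" else s
      if d.getD brack "" ≠ "" then s ++ "\n[" ++ d.getD brack "" ++ "]" else s
    | none => s
  if d.getD "batch" "" ≠ "" then s ++ "\n{" ++ d.getD "batch" "" ++ "}" else s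

-- Source B's render: recursive, back-to-front
def pvRender (fields : Option (String × String)) : List (List (String × String)) → String
  | [] => ""
  | [e] => pvCellB fields e
  | e :: rest => pvCellB fields e ++ "\n━━━━━━━━━━━━\n" ++ pvRender fields rest

def format_multi_entry_py_alt (entries : List (List (String × String))) (mode : String) : String × String × String :=
  (pvRender (pvModeFields.get? mode) entries, "#42A5F5", "#000000")

-- ===== PRECONDITION & SPEC =====
def Spec_format_multi_entry_py (entries : List (List (String × String))) (mode : String) (out : String × String × String) : Prop := out = format_multi_entry_py_alt entries mode
instance (entries : List (List (String × String))) (mode : String) (out : String × String × String) : Decidable (Spec_format_multi_entry_py entries mode out) := by unfold Spec_format_multi_entry_py; infer_instance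

-- ===== CLAIM =====
def Claim_equal_format_multi_entry_py : Prop := ∀ (entries : List (List (String × String))) (mode : String), Dom_format_multi_entry_py entries mode → Spec_format_multi_entry_py entries mode (format_multi_entry_py entries mode)

-- ===== LEMMAS AND PROOFS =====
theorem pvCell_eq (mode : String) (e : List (String × String)) :
    pvCellA mode e = pvCellB (pvModeFields.get? mode) e := by
  by_cases h1 : mode = "section"
  · subst h1
    rw [show pvModeFields.get? "section" = some ("teacher", "room") from by decide]
    unfold pvCellA pvCellB
    split_ifs <;>
      (apply String.toList_inj.mp;
       simp_all [PySem.Str.join, PySem.Chars.join_cons_cons, PySem.Chars.join_singleton])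
  · by_cases h2 : mode = "teacher"
    · subst h2
      rw [show pvModeFields.get? "teacher" = some ("section", "room") from by decide]
      unfold pvCellA pvCellB
      split_ifs <;>
        (apply String.toList_inj.mp;
         simp_all [PySem.Str.join, PySem.Chars.join_cons_cons, PySem.Chars.join_singleton])
    · by_cases h3 : mode = "room"
      · subst h3
        rw [show pvModeFields.get? "room" = some ("section", "teacher") from by decide]
        unfold pvCellA pvCellB
        split_ifs <;>
          (apply String.toList_inj.mp;
           simp_all [PySem.Str.join, PySem.Chars.join_cons_cons, PySem.Chars.join_singleton])
      · have hg : pvModeFields.get? mode = none := by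
          unfold pvModeFields
          simp [PySem.Dict.get?, Ne.symm h1, Ne.symm h2, Ne.symm h3]
        rw [hg]
        unfold pvCellA pvCellB
        simp only [beq_iff_eq, h1, h2, h3, if_false]
        split_ifs <;>
          (apply String.toList_inj.mp;
           simp_all [PySem.Str.join, PySem.Chars.join_cons_cons, PySem.Chars.join_singleton])

theorem pvFoldl_map (f : List (String × String) → String)
    (l : List (List (String × String))) (acc : List String) :
    l.foldl (fun acc e => acc ++ [f e]) acc = acc ++ l.map f := by
  induction l generalizing acc with
  | nil => simp
  | cons x xs ih => simp [List.foldl, ih]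

theorem pvJoin_render (fields : Option (String × String)) (l : List (List (String × String))) :
    PySem.Str.join "\n━━━━━━━━━━━━\n" (l.map (pvCellB fields)) = pvRender fields l := by
  induction l with
  | nil =>
    apply String.toList_inj.mp
    simp [PySem.Str.join, PySem.Chars.join_nil, pvRender]
  | cons x xs ih =>
    cases xs with
    | nil =>
      apply String.toList_inj.mp
      simp [PySem.Str.join, PySem.Chars.join_singleton, pvRender]
    | cons y ys =>
      rw [show pvRender fields (x :: y :: ys)
            = pvCellB fields x ++ "\n━━━━━━━━━━━━\n" ++ pvRender fields (y :: ys) from rfl,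
          ← ih]
      apply String.toList_inj.mp
      simp [PySem.Str.join, PySem.Chars.join_cons_cons]

-- ===== VERDICT =====
theorem format_multi_entry_py_spec : Claim_equal_format_multi_entry_py := by
  intro entries mode _
  unfold Spec_format_multi_entry_py format_multi_entry_py format_multi_entry_py_alt
  have h1 : entries.foldl (fun acc e => acc ++ [pvCellA mode e]) []
      = entries.map (pvCellB (pvModeFields.get? mode)) := by
    rw [pvFoldl_map, List.nil_append]
    exact List.map_congr_left (fun e _ => pvCell_eq mode e)
  simp only [h1, pvJoin_render]
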